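-- pv_equiv track=rewrite | github.com/Habosjob/Vibe | moex_bond_screener/emitents.py | _collect_bond_isins_by_emitter
-- ===== SOURCE A (Python) =====
-- from typing import Any, Callable
--
-- def _collect_bond_isins_by_emitter(eligible_bonds: list[dict[str, Any]], secid_to_emitter: dict[str, str]) -> dict[str, list[str]]:
--     by_emitter: dict[str, set[str]] = {}
--     for bond in eligible_bonds:
--         secid = str(bond.get("SECID") or "").strip()
--         isin = str(bond.get("ISIN") or "").strip()
--         emitter_id = _normalize_emitter_id(
--             bond.get("EMITTER_ID")
--             or bond.get("ISSUER_ID")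
--             or secid_to_emitter.get(secid, "")
--             or ""
--         )
--         if not emitter_id or not isin:
--             continue
--         by_emitter.setdefault(emitter_id, set()).add(isin)
--     return {emitter_id: sorted(isins) for emitter_id, isins in by_emitter.items()}
--
-- def _normalize_emitter_id(raw_value: Any) -> str:
--     value = str(raw_value or "").strip()
--     if not value:
--         return ""
--     if value.endswith(".0"):
--         integer_part = value[:-2]
--         if integer_part.isdigit():
--             return integer_part
--     return value
-- ===== SOURCE B (Python) =====
-- # B: instead of building a dict of per-emitter sets and sorting each at the end,
-- # keep an association list of (emitter, sorted duplicate-free isin list) and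
-- # insert each isin into its sorted position as bonds are scanned; dict() at the end.
-- def _normalize_emitter_id(raw_value):
--     value = str(raw_value or "").strip()
--     if value.endswith(".0") and value[:-2].isdigit():
--         return value[:-2]
--     return value
--
-- def _first_truthy(values):
--     for v in values:
--         if v:
--             return v
--     return ""
--
-- def _insert_sorted_unique(lst, x):
--     i = 0
--     n = len(lst)
--     while i < n and lst[i] < x:
--         i += 1
--     if i == n or lst[i] != x:
--         lst.insert(i, x)
--
-- def _collect_bond_isins_by_emitter(eligible_bonds, secid_to_emitter):
--     groups = []
--     for bond in eligible_bonds: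
--         secid = str(bond.get("SECID") or "").strip()
--         isin = str(bond.get("ISIN") or "").strip()
--         emitter_id = _normalize_emitter_id(_first_truthy([
--             bond.get("EMITTER_ID"),
--             bond.get("ISSUER_ID"),
--             secid_to_emitter.get(secid, ""),
--         ]))
--         if not emitter_id or not isin:
--             continue
--         for entry in groups:
--             if entry[0] == emitter_id:
--                 _insert_sorted_unique(entry[1], isin)
--                 break
--         else:
--             groups.append((emitter_id, [isin]))
--     return dict(groups)
-- ===== Notes on version B (the rewrite author's own statement) =====
-- stated objective: alternative
-- what changed: Replaces A's incrementally-built dict of per-emitter sets with a final per-group sort by an association list of (emitter, sorted duplicate-free isin list) maintained by in-place sorted insertion during the single scan, so no set and no final sorting pass exist.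
import Mathlib
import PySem

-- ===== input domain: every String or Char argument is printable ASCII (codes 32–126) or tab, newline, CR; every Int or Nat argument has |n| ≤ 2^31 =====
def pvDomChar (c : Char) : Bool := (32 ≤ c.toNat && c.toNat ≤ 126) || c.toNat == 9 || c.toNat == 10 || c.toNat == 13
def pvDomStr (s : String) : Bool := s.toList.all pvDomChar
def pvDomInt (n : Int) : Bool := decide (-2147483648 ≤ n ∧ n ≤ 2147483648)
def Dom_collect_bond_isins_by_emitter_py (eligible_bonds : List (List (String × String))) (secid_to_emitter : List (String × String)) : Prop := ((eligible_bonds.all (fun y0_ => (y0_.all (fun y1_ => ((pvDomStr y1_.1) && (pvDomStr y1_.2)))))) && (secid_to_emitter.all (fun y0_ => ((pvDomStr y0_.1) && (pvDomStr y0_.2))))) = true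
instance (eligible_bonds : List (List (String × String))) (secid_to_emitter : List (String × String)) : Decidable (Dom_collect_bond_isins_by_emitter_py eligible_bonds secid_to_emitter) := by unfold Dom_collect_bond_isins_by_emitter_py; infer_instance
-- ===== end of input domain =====

-- B replaces A's dict of per-emitter sets (each sorted at the end) by an association list of
-- (emitter, sorted duplicate-free isin list) maintained by sorted insertion during the scan
-- (objective: alternative data structure; not claimed faster).

-- ===== PORT A =====
-- Python's `x or y` on an optional string (falsy = missing or empty)
def pyOrStr (o : Option String) (b : String) : String :=
  match o with
  | some s => if s = "" then b else s
  | none => b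

-- A's _normalize_emitter_id
def pvNormalizeA (raw_value : String) : String :=
  let value := PySem.Str.strip (if raw_value = "" then "" else raw_value)
  if value = "" then ""
  else if PySem.Str.endswith value ".0" then
    let integer_part := PySem.Str.slice value none (some (-2))
    if PySem.Str.strIsdigit integer_part then integer_part else value
  else value

def collect_bond_isins_by_emitter_py (eligible_bonds : List (List (String × String))) (secid_to_emitter : List (String × String)) : List (String × List String) :=
  -- by_emitter.setdefault(e, set()).add(isin) = modify e ∅ (·.add isin)
  let by_emitter : PySem.Dict String (PySem.Set String) :=
    eligible_bonds.foldl (fun d bond =>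
      let secid := PySem.Str.strip (pyOrStr ((PySem.Dict.mk bond).get? "SECID") "")
      let isin := PySem.Str.strip (pyOrStr ((PySem.Dict.mk bond).get? "ISIN") "")
      let emitter_id := pvNormalizeA (pyOrStr ((PySem.Dict.mk bond).get? "EMITTER_ID")
        (pyOrStr ((PySem.Dict.mk bond).get? "ISSUER_ID")
          (pyOrStr (some ((PySem.Dict.mk secid_to_emitter).getD secid "")) "")))
      if emitter_id = "" || isin = "" then d
      else d.modify emitter_id [] (fun s => PySem.Set.add s isin)) PySem.Dict.empty
  by_emitter.items.map (fun p => (p.1, PySem.List.sorted p.2 (fun x => x) false))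

-- ===== PORT B =====
-- B's _first_truthy: first truthy value of a candidate list (None and "" are falsy)
def pvFirstTruthy : List (Option String) → String
  | [] => ""
  | v :: rest =>
      match v with
      | some s => if s ≠ "" then s else pvFirstTruthy rest
      | none => pvFirstTruthy rest

-- B's _normalize_emitter_id (merged condition)
def pvNormalizeB (raw_value : String) : String :=
  let value := PySem.Str.strip (if raw_value = "" then "" else raw_value)
  if PySem.Str.endswith value ".0" ∧
      PySem.Str.strIsdigit (PySem.Str.slice value none (some (-2))) then
    PySem.Str.slice value none (some (-2))
  else value

-- B's _insert_sorted_unique: walk past smaller elements, skip an equal one, insert before a larger one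
def pvInsortUnique : List String → String → List String
  | [], x => [x]
  | y :: ys, x =>
      if y < x then y :: pvInsortUnique ys x
      else if y = x then y :: ys
      else x :: y :: ys

-- B's inner for/else over groups: update the first entry with this emitter, else append a new one
def pvUpdGroups : List (String × List String) → String → String → List (String × List String)
  | [], e, i => [(e, [i])]
  | g :: t, e, i =>
      if g.1 = e then (g.1, pvInsortUnique g.2 i) :: t
      else g :: pvUpdGroups t e i

-- B's main loop, one bond at a time
def pvCollectGroups (secid_to_emitter : List (String × String)) :
    List (List (String × String)) → List (String × List String) → List (String × List String)
  | [], groups => groups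
  | bond :: rest, groups =>
      let secid := PySem.Str.strip (((PySem.Dict.mk bond).get? "SECID").getD "")
      let isin := PySem.Str.strip (((PySem.Dict.mk bond).get? "ISIN").getD "")
      let emitter_id := pvNormalizeB (pvFirstTruthy
        [(PySem.Dict.mk bond).get? "EMITTER_ID",
         (PySem.Dict.mk bond).get? "ISSUER_ID",
         some ((PySem.Dict.mk secid_to_emitter).getD secid "")])
      pvCollectGroups secid_to_emitter rest
        (if emitter_id = "" ∨ isin = "" then groups else pvUpdGroups groups emitter_id isin)

def collect_bond_isins_by_emitter_py_alt (eligible_bonds : List (List (String × String))) (secid_to_emitter : List (String × String)) : List (String × List String) :=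
  pvCollectGroups secid_to_emitter eligible_bonds []

-- ===== PRECONDITION & SPEC =====
def Spec_collect_bond_isins_by_emitter_py (eligible_bonds : List (List (String × String))) (secid_to_emitter : List (String × String)) (out : List (String × List String)) : Prop := out = collect_bond_isins_by_emitter_py_alt eligible_bonds secid_to_emitter
instance (eligible_bonds : List (List (String × String))) (secid_to_emitter : List (String × String)) (out : List (String × List String)) : Decidable (Spec_collect_bond_isins_by_emitter_py eligible_bonds secid_to_emitter out) := by unfold Spec_collect_bond_isins_by_emitter_py; infer_instance

-- ===== CLAIM (what is proved, stated in full; the proofs are below) =====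
def Claim_equal_collect_bond_isins_by_emitter_py : Prop := ∀ (eligible_bonds : List (List (String × String))) (secid_to_emitter : List (String × String)), Dom_collect_bond_isins_by_emitter_py eligible_bonds secid_to_emitter → Spec_collect_bond_isins_by_emitter_py eligible_bonds secid_to_emitter (collect_bond_isins_by_emitter_py eligible_bonds secid_to_emitter)

-- ===== LEMMAS AND PROOFS =====

-- the common per-bond extraction both programs perform; none = the loop's `continue`
def pvPairOf (secid_to_emitter : List (String × String)) (bond : List (String × String)) :
    Option (String × String) :=
  let secid := PySem.Str.strip (pyOrStr ((PySem.Dict.mk bond).get? "SECID") "")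
  let isin := PySem.Str.strip (pyOrStr ((PySem.Dict.mk bond).get? "ISIN") "")
  let emitter_id := pvNormalizeA (pyOrStr ((PySem.Dict.mk bond).get? "EMITTER_ID")
    (pyOrStr ((PySem.Dict.mk bond).get? "ISSUER_ID")
      (pyOrStr (some ((PySem.Dict.mk secid_to_emitter).getD secid "")) "")))
  if emitter_id = "" || isin = "" then none else some (emitter_id, isin)

-- B's normalize agrees with A's
theorem normB_eq (v : String) : pvNormalizeB v = pvNormalizeA v := by
  unfold pvNormalizeB pvNormalizeA
  by_cases h0 : PySem.Str.strip (if v = "" then "" else v) = ""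
  · rw [h0]
    have he : PySem.Chars.endswith [] ['.', '0'] = false := by decide
    simp [he]
  · simp only [h0, if_false]
    split_ifs with ha hb hc <;> simp_all

-- B's candidate chain agrees with A's `or` chain
theorem firstTruthy_eq (a b : Option String) (c : String) :
    pvFirstTruthy [a, b, some c] = pyOrStr a (pyOrStr b (pyOrStr (some c) "")) := by
  cases a <;> cases b <;>
    (simp only [pvFirstTruthy, pyOrStr]; split_ifs <;> simp_all)

theorem getD_eq_pyOr (o : Option String) : o.getD "" = pyOrStr o "" := by
  cases o with
  | none => rfl
  | some s => by_cases hs : s = "" <;> simp [pyOrStr, hs]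

theorem mem_insortUnique (l : List String) (x y : String) :
    y ∈ pvInsortUnique l x ↔ y = x ∨ y ∈ l := by
  induction l with
  | nil => simp [pvInsortUnique]
  | cons h t ih =>
    unfold pvInsortUnique
    split_ifs with h1 h2
    · simp [ih]; tauto
    · subst h2; simp
    · simp

theorem insortUnique_pairwise (l : List String) (x : String)
    (h : l.Pairwise (· < ·)) : (pvInsortUnique l x).Pairwise (· < ·) := by
  induction l with
  | nil => simp [pvInsortUnique]
  | cons a t ih =>
    unfold pvInsortUnique
    rw [List.pairwise_cons] at h
    split_ifs with h1 h2
    · rw [List.pairwise_cons]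
      refine ⟨?_, ih h.2⟩
      intro y hy
      rcases (mem_insortUnique t x y).1 hy with rfl | hy
      · exact h1
      · exact h.1 y hy
    · subst h2; exact List.pairwise_cons.2 h
    · rw [List.pairwise_cons]
      refine ⟨?_, List.pairwise_cons.2 h⟩
      intro y hy
      have hxa : x < a := lt_of_le_of_ne (not_lt.1 h1) (fun hx => h2 hx.symm)
      rcases List.mem_cons.1 hy with rfl | hy
      · exact hxa
      · exact lt_trans hxa (h.1 y hy)

theorem foldl_insortUnique_spec (xs : List String) :
    ∀ (base : List String), base.Pairwise (· < ·) →
      (xs.foldl pvInsortUnique base).Pairwise (· < ·) ∧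
      (∀ y, y ∈ xs.foldl pvInsortUnique base ↔ y ∈ base ∨ y ∈ xs) := by
  induction xs with
  | nil => intro base hb; simpa using hb
  | cons x t ih =>
    intro base hb
    have hb' := insortUnique_pairwise base x hb
    obtain ⟨p1, p2⟩ := ih (pvInsortUnique base x) hb'
    refine ⟨p1, ?_⟩
    intro y
    rw [List.foldl_cons] at *
    rw [p2 y, mem_insortUnique]
    simp; tauto

-- folding insortUnique from [] IS sorted(set(xs))
theorem foldl_insortUnique_eq_sorted (xs : List String) :
    xs.foldl pvInsortUnique [] =
      PySem.List.sorted (PySem.Set.ofList xs) (fun x => x) false := by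
  obtain ⟨hp, hm⟩ := foldl_insortUnique_spec xs [] (by simp)
  refine (PySem.List.sorted_eq_of_perm_of_pairwise_lt _ _ _ ?_ ?_).symm
  · rw [List.perm_ext_iff_of_nodup (hp.imp ne_of_lt) (PySem.Set.nodup_ofList xs)]
    intro y
    rw [hm y, PySem.Set.mem_ofList]
    simp
  · exact hp

-- keys of an updated group list
theorem map_fst_updGroups (g : List (String × List String)) (e i : String) :
    (pvUpdGroups g e i).map (·.1) = PySem.Set.add (g.map (·.1)) e := by
  induction g with
  | nil => rfl
  | cons p t ih =>
    unfold pvUpdGroups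
    by_cases h : p.1 = e
    · simp [h, PySem.Set.add, PySem.Set.contains]
    · simp only [h, if_false, List.map_cons, ih, PySem.Set.add, PySem.Set.contains]
      by_cases hc : e ∈ t.map (·.1) <;> simp [hc, Ne.symm h]

-- first-match lookup with default []
def pvLookupD (g : List (String × List String)) (e : String) : List String :=
  match g.find? (fun p => p.1 = e) with
  | some p => p.2
  | none => []

-- lookup unfolding on a cons cell
theorem lookupD_cons (k : String) (v : List String) (t : List (String × List String)) (e : String) :
    pvLookupD ((k, v) :: t) e = if k = e then v else pvLookupD t e := by
  unfold pvLookupD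
  rw [List.find?_cons]
  by_cases h : k = e <;> simp [h]

-- lookup in an updated group list
theorem lookupD_updGroups (g : List (String × List String)) (e i e' : String) :
    pvLookupD (pvUpdGroups g e i) e' =
      if e' = e then pvInsortUnique (pvLookupD g e') i else pvLookupD g e' := by
  induction g with
  | nil =>
    show pvLookupD [(e, [i])] e' = _
    rw [lookupD_cons]
    by_cases h : e' = e
    · simp [h, pvLookupD, pvInsortUnique]
    · simp [h, Ne.symm h, pvLookupD]
  | cons p t ih =>
    unfold pvUpdGroups
    by_cases h : p.1 = e
    · simp only [h, if_true]
      rw [lookupD_cons, lookupD_cons]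
      by_cases h' : e' = e
      · simp [h', h]
      · have h1 : ¬ e = e' := fun hx => h' hx.symm
        have h2 : ¬ p.1 = e' := by rw [h]; exact h1
        simp [h1, h2, h']
    · simp only [h, if_false]
      rcases p with ⟨k, v⟩
      rw [lookupD_cons, lookupD_cons, ih]
      by_cases h1 : k = e'
      · have h2 : ¬ e' = e := fun hx => h (by simp_all)
        simp [h1, h2]
      · simp [h1]

-- a group list is its key list mapped through lookup, once keys are nodup
theorem groups_eq_map_keys (g : List (String × List String)) (h : (g.map (·.1)).Nodup) :
    g = (g.map (·.1)).map (fun e => (e, pvLookupD g e)) := by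
  induction g with
  | nil => rfl
  | cons p t ih =>
    rcases p with ⟨k, v⟩
    simp only [List.map_cons, List.nodup_cons] at h ⊢
    rw [lookupD_cons, if_pos rfl]
    conv_lhs => rw [ih h.2]
    congr 1
    apply List.map_congr_left
    intro e he
    have hk : ¬ k = e := fun hx => h.1 (hx ▸ he)
    rw [lookupD_cons, if_neg hk]

-- B's loop over an extracted pair list, characterised pointwise
theorem foldl_updGroups_spec (ps : List (String × String)) :
    ∀ (g : List (String × List String)),
      ((ps.foldl (fun g p => pvUpdGroups g p.1 p.2) g).map (·.1)
          = PySem.Set.update (g.map (·.1)) (ps.map (·.1))) ∧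
      (∀ e, pvLookupD (ps.foldl (fun g p => pvUpdGroups g p.1 p.2) g) e
          = ((ps.filter (fun p => p.1 == e)).map (·.2)).foldl pvInsortUnique (pvLookupD g e)) := by
  induction ps with
  | nil => intro g; exact ⟨rfl, fun e => rfl⟩
  | cons p t ih =>
    intro g
    obtain ⟨k1, k2⟩ := ih (pvUpdGroups g p.1 p.2)
    constructor
    · rw [List.foldl_cons, k1, map_fst_updGroups, List.map_cons, PySem.Set.update_cons]
    · intro e
      rw [List.foldl_cons, k2 e, lookupD_updGroups, List.filter_cons]
      by_cases h : p.1 = e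
      · simp [h]
      · have hb : (p.1 == e) = false := by simpa using h
        have he : ¬ e = p.1 := fun hx => h hx.symm
        simp [hb, he]

-- A's loop body IS the per-bond extraction followed by a conditional dict update
theorem bodyA_eq (sm : List (String × String)) :
    (fun (d : PySem.Dict String (PySem.Set String)) (bond : List (String × String)) =>
      let secid := PySem.Str.strip (pyOrStr ((PySem.Dict.mk bond).get? "SECID") "")
      let isin := PySem.Str.strip (pyOrStr ((PySem.Dict.mk bond).get? "ISIN") "")
      let emitter_id := pvNormalizeA (pyOrStr ((PySem.Dict.mk bond).get? "EMITTER_ID")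
        (pyOrStr ((PySem.Dict.mk bond).get? "ISSUER_ID")
          (pyOrStr (some ((PySem.Dict.mk sm).getD secid "")) "")))
      if emitter_id = "" || isin = "" then d
      else d.modify emitter_id [] (fun s => PySem.Set.add s isin))
    = (fun d bond =>
      match pvPairOf sm bond with
      | none => d
      | some p => d.modify p.1 [] (fun s => PySem.Set.add s p.2)) := by
  funext d bond
  unfold pvPairOf
  dsimp only
  split <;> simp_all

-- A's loop, filtered through pvPairOf, is a fold over the extracted pair list
theorem foldlA_eq (sm : List (String × String)) :
    ∀ (l : List (List (String × String))) (d : PySem.Dict String (PySem.Set String)),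
      l.foldl (fun d bond =>
          match pvPairOf sm bond with
          | none => d
          | some p => d.modify p.1 [] (fun s => PySem.Set.add s p.2)) d
        = (l.filterMap (pvPairOf sm)).foldl
            (fun d p => d.modify p.1 [] (fun s => PySem.Set.add s p.2)) d := by
  intro l
  induction l with
  | nil => intro d; rfl
  | cons hd tl ih =>
    intro d
    simp only [List.foldl_cons, List.filterMap_cons]
    cases pvPairOf sm hd <;> simp [ih]

-- B's loop is the fold of updGroups over the same extracted pair list
theorem collectGroups_eq (sm : List (String × String)) :
    ∀ (l : List (List (String × String))) (g : List (String × List String)),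
      pvCollectGroups sm l g
        = (l.filterMap (pvPairOf sm)).foldl (fun g p => pvUpdGroups g p.1 p.2) g := by
  intro l
  induction l with
  | nil => intro g; rfl
  | cons bond rest ih =>
    intro g
    rw [List.filterMap_cons]
    simp only [pvCollectGroups]
    rw [ih]
    simp only [getD_eq_pyOr, firstTruthy_eq, normB_eq]
    unfold pvPairOf
    dsimp only
    split_ifs <;> simp_all

-- the value A's dict holds at key e
theorem getD_foldl_modify_add :
    ∀ (ps : List (String × String)) (d : PySem.Dict String (PySem.Set String)) (e : String),
      (ps.foldl (fun d p => d.modify p.1 [] (fun s => PySem.Set.add s p.2)) d).getD e []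
        = PySem.Set.update (d.getD e []) ((ps.filter (fun p => p.1 == e)).map (·.2)) := by
  intro ps
  induction ps with
  | nil => intro d e; simp [PySem.Set.update]
  | cons p t ih =>
    intro d e
    simp only [List.foldl_cons, List.filter_cons]
    by_cases h : p.1 = e
    · subst h
      simp only [beq_self_eq_true, if_pos, List.map_cons]
      rw [ih, PySem.Set.update_cons, PySem.Dict.modify,
        PySem.Dict.getD_eq_get?_getD, PySem.Dict.get?_insert_self]
      rfl
    · have hne : (p.1 == e) = false := by simpa using h
      simp only [hne, Bool.false_eq_true, if_neg, not_false_iff]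
      rw [ih, PySem.Dict.modify, PySem.Dict.getD_eq_get?_getD,
        PySem.Dict.get?_insert_of_ne _ _ (fun hc => h hc.symm),
        ← PySem.Dict.getD_eq_get?_getD]

-- A, rewritten over the extracted pair list ps
theorem portA_eq (ps : List (String × String)) :
    (ps.foldl (fun d p => d.modify p.1 [] (fun s => PySem.Set.add s p.2))
        (PySem.Dict.empty : PySem.Dict String (PySem.Set String))).items.map
      (fun p => (p.1, PySem.List.sorted p.2 (fun x => x) false))
      = (PySem.Set.ofList (ps.map (·.1))).map (fun e =>
          (e, PySem.List.sorted (PySem.Set.ofList ((ps.filter (fun p => p.1 == e)).map (·.2)))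
                (fun x => x) false)) := by
  set D := ps.foldl (fun d p => d.modify p.1 [] (fun s => PySem.Set.add s p.2))
      (PySem.Dict.empty : PySem.Dict String (PySem.Set String)) with hD
  have hkeys : D.keys = PySem.Set.ofList (ps.map (·.1)) := by
    rw [hD, PySem.Dict.keys_foldl_modify_key]
    simp [PySem.Dict.empty, PySem.Dict.keys, PySem.Set.update_nil_left]
  have hnd : D.keys.Nodup := by
    rw [hkeys]; exact PySem.Set.nodup_ofList _
  have hitems := PySem.Dict.items_eq_map_keys D hnd []
  rw [hitems, hkeys, List.map_map]
  refine List.map_congr_left ?_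
  intro e _
  simp only [Function.comp]
  congr 1
  rw [hD, getD_foldl_modify_add]
  simp [PySem.Dict.empty, PySem.Dict.getD_eq_get?_getD, PySem.Dict.get?,
    PySem.Set.update_nil_left]

-- B, rewritten over the extracted pair list ps: the same list
theorem portB_eq (ps : List (String × String)) :
    ps.foldl (fun g p => pvUpdGroups g p.1 p.2) []
      = (PySem.Set.ofList (ps.map (·.1))).map (fun e =>
          (e, PySem.List.sorted (PySem.Set.ofList ((ps.filter (fun p => p.1 == e)).map (·.2)))
                (fun x => x) false)) := by
  obtain ⟨hk, hl⟩ := foldl_updGroups_spec ps []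
  have hkeys : (ps.foldl (fun g p => pvUpdGroups g p.1 p.2) []).map (·.1)
      = PySem.Set.ofList (ps.map (·.1)) := by
    rw [hk]; simp [PySem.Set.update_nil_left]
  have hnd : ((ps.foldl (fun g p => pvUpdGroups g p.1 p.2) []).map (·.1)).Nodup := by
    rw [hkeys]; exact PySem.Set.nodup_ofList _
  conv_lhs => rw [groups_eq_map_keys _ hnd]
  rw [hkeys]
  apply List.map_congr_left
  intro e _
  rw [hl e]
  congr 1
  exact foldl_insortUnique_eq_sorted _

-- ===== VERDICT (by name: the statement is the Claim_ definition above) =====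
theorem collect_bond_isins_by_emitter_py_spec : Claim_equal_collect_bond_isins_by_emitter_py := by
  intro eligible_bonds secid_to_emitter _
  show collect_bond_isins_by_emitter_py eligible_bonds secid_to_emitter
      = collect_bond_isins_by_emitter_py_alt eligible_bonds secid_to_emitter
  unfold collect_bond_isins_by_emitter_py collect_bond_isins_by_emitter_py_alt
  dsimp only
  rw [bodyA_eq, foldlA_eq, portA_eq, collectGroups_eq, portB_eq]
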